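-- pv_equiv track=rewrite | github.com/nchie/cynthionwhisperer | cynthionwhisperer-example/src/cynthionwhisperer_python/cli.py | _resolve_power_source_index
-- ===== SOURCE A (Python) =====
-- from typing import Optional
--
-- def _canonical_source_name(name: str) -> str:
--     cleaned = name.strip().upper().replace("_", "-")
--     if cleaned in ("TARGETC", "TARGET-C"):
--         return "TARGET-C"
--     if cleaned in ("CONTROL",):
--         return "CONTROL"
--     if cleaned in ("AUX",):
--         return "AUX"
--     if cleaned in ("HOST",):
--         return "HOST"
--     return cleaned
--
-- def _resolve_power_source_index(requested: str, sources: list[str]) -> Optional[int]: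
--     canonical_sources = [_canonical_source_name(source) for source in sources]
--     requested_name = _canonical_source_name(requested)
--
--     if requested_name in canonical_sources:
--         return canonical_sources.index(requested_name)
--
--     # Old firmware versions may expose HOST instead of CONTROL.
--     if requested_name == "CONTROL" and "HOST" in canonical_sources:
--         return canonical_sources.index("HOST")
--     if requested_name == "HOST" and "CONTROL" in canonical_sources:
--         return canonical_sources.index("CONTROL")
--
--     return None
-- ===== SOURCE B (Python) =====
-- from typing import Optional
--
-- def _canonical(name: str) -> str:
--     cleaned = name.strip().upper().replace("_", "-")
--     return "TARGET-C" if cleaned == "TARGETC" else cleaned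
--
-- def _resolve_power_source_index(requested: str, sources: list[str]) -> Optional[int]:
--     req = _canonical(requested)
--     fallback_name = "HOST" if req == "CONTROL" else ("CONTROL" if req == "HOST" else None)
--     direct = fallback = None
--     for i, source in enumerate(sources):
--         c = _canonical(source)
--         if direct is None and c == req:
--             direct = i
--         if fallback is None and c == fallback_name:
--             fallback = i
--     return direct if direct is not None else fallback
-- ===== Notes on version B (the rewrite author's own statement) =====
-- stated objective: simpler
-- what changed: Replaces A's build-canonical-list-then-up-to-three-membership/index scans with a single enumerate pass that tracks the first direct-match index and the first fallback-match index, returning direct else fallback.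
import Mathlib
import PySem

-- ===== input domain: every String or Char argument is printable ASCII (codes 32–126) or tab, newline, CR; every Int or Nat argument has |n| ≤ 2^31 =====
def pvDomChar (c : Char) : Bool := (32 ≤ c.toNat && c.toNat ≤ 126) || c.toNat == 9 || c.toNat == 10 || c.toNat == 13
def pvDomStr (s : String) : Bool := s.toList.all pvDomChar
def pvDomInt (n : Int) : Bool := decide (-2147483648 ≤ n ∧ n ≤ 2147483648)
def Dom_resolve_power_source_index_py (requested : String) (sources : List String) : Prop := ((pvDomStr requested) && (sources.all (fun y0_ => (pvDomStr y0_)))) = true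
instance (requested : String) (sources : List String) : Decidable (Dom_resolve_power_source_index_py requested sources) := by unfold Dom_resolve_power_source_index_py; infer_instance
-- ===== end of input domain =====

-- B replaces A's build-canonical-list-then-up-to-three-membership/index-scans with a single
-- enumerate pass tracking the first direct-match index and the first fallback-match index (objective: simpler, one traversal).

-- ===== PORT A =====
def pvCanonA (name : String) : String :=
  let cleaned := PySem.Str.replace (PySem.Str.upper (PySem.Str.strip name)) "_" "-"
  if cleaned = "TARGETC" ∨ cleaned = "TARGET-C" then "TARGET-C"
  else if cleaned = "CONTROL" then "CONTROL"
  else if cleaned = "AUX" then "AUX"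
  else if cleaned = "HOST" then "HOST"
  else cleaned

def resolve_power_source_index_py (requested : String) (sources : List String) : Option Int :=
  let canonical_sources := sources.map pvCanonA
  let requested_name := pvCanonA requested
  if canonical_sources.contains requested_name then
    (PySem.List.index? canonical_sources requested_name).map (Int.ofNat)
  else if requested_name = "CONTROL" ∧ canonical_sources.contains "HOST" then
    (PySem.List.index? canonical_sources "HOST").map (Int.ofNat)
  else if requested_name = "HOST" ∧ canonical_sources.contains "CONTROL" then
    (PySem.List.index? canonical_sources "CONTROL").map (Int.ofNat)
  else none

-- ===== PORT B =====
def pvCanonB (name : String) : String :=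
  let cleaned := PySem.Str.replace (PySem.Str.upper (PySem.Str.strip name)) "_" "-"
  if cleaned = "TARGETC" then "TARGET-C" else cleaned

def resolve_power_source_index_py_alt (requested : String) (sources : List String) : Option Int :=
  let req := pvCanonB requested
  let fallback_name : Option String :=
    if req = "CONTROL" then some "HOST" else if req = "HOST" then some "CONTROL" else none
  let st := (PySem.List.enumerate sources 0).foldl
    (fun (st : Option Int × Option Int) p =>
      let c := pvCanonB p.2
      let st1 := if st.1 = none ∧ c = req then (some p.1, st.2) else st
      if st1.2 = none ∧ some c = fallback_name then (st1.1, some p.1) else st1)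
    (none, none)
  match st.1 with
  | some i => some i
  | none => st.2

-- ===== PRECONDITION & SPEC =====
def Spec_resolve_power_source_index_py (requested : String) (sources : List String) (out : Option Int) : Prop := out = resolve_power_source_index_py_alt requested sources
instance (requested : String) (sources : List String) (out : Option Int) : Decidable (Spec_resolve_power_source_index_py requested sources out) := by unfold Spec_resolve_power_source_index_py; infer_instance

-- ===== CLAIM (what is proved, stated in full; the proofs are below) =====
def Claim_equal_resolve_power_source_index_py : Prop := ∀ (requested : String) (sources : List String), Dom_resolve_power_source_index_py requested sources → Spec_resolve_power_source_index_py requested sources (resolve_power_source_index_py requested sources)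

-- ===== LEMMAS AND PROOFS =====

theorem canon_eq (name : String) : pvCanonA name = pvCanonB name := by
  have h : ∀ cl : String,
      (if cl = "TARGETC" ∨ cl = "TARGET-C" then "TARGET-C"
       else if cl = "CONTROL" then "CONTROL"
       else if cl = "AUX" then "AUX"
       else if cl = "HOST" then "HOST" else cl)
      = (if cl = "TARGETC" then "TARGET-C" else cl) := by
    intro cl
    by_cases h1 : cl = "TARGETC" ∨ cl = "TARGET-C" <;>
      by_cases h2 : cl = "TARGETC" <;>
        simp_all <;> split_ifs <;> simp_all
  simp only [pvCanonA, pvCanonB]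
  exact h _

-- first index (counting from k) of an element of xs satisfying p
def pvFirstIdx (p : String → Prop) [DecidablePred p] : List String → Int → Option Int
  | [], _ => none
  | x :: t, k => if p x then some k else pvFirstIdx p t (k + 1)

theorem firstIdx_eq_index? (c : String → String) (y : String) (xs : List String) (k : Int) :
    pvFirstIdx (fun x => c x = y) xs k
      = Option.map (fun n : Nat => k + (n : Int)) (PySem.List.index? (xs.map c) y) := by
  induction xs generalizing k with
  | nil => simp [pvFirstIdx, PySem.List.index?]
  | cons x t ih =>
      by_cases h : c x = y
      · rw [show (x :: t).map c = c x :: t.map c from rfl, h,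
          PySem.List.index?_cons_self]
        simp [pvFirstIdx, h]
      · rw [show (x :: t).map c = c x :: t.map c from rfl,
          PySem.List.index?_cons_of_ne _ h]
        simp only [pvFirstIdx, if_neg h, ih]
        cases PySem.List.index? (t.map c) y <;> simp <;> omega


theorem firstIdx_congr (p q : String → Prop) [DecidablePred p] [DecidablePred q]
    (h : ∀ x, p x ↔ q x) (xs : List String) (k : Int) :
    pvFirstIdx p xs k = pvFirstIdx q xs k := by
  induction xs generalizing k with
  | nil => rfl
  | cons x t ih => simp only [pvFirstIdx, h x]; rw [ih]

theorem firstIdx_never (p : String → Prop) [DecidablePred p] (h : ∀ x, ¬ p x)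
    (xs : List String) (k : Int) : pvFirstIdx p xs k = none := by
  induction xs generalizing k with
  | nil => rfl
  | cons x t ih => simp only [pvFirstIdx, if_neg (h x)]; exact ih _

theorem fold_spec (req : String) (fbt : Option String) (xs : List String) (k : Int)
    (st : Option Int × Option Int) :
    (PySem.List.enumerate xs k).foldl
      (fun (st : Option Int × Option Int) p =>
        let c := pvCanonB p.2
        let st1 := if st.1 = none ∧ c = req then (some p.1, st.2) else st
        if st1.2 = none ∧ some c = fbt then (st1.1, some p.1) else st1)
      st
    = ((match st.1 with
        | some i => some i
        | none => pvFirstIdx (fun x => pvCanonB x = req) xs k),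
       (match st.2 with
        | some i => some i
        | none => pvFirstIdx (fun x => some (pvCanonB x) = fbt) xs k)) := by
  induction xs generalizing k st with
  | nil => cases st with
      | mk a b => cases a <;> cases b <;> simp [PySem.List.enumerate_nil, pvFirstIdx]
  | cons x t ih =>
      rw [PySem.List.enumerate_cons, List.foldl_cons, ih]
      cases st with
      | mk a b =>
        cases a <;> cases b <;>
          by_cases h1 : pvCanonB x = req <;>
          by_cases h2 : some (pvCanonB x) = fbt <;>
            simp_all [pvFirstIdx]

theorem index?_natCast_map (o : Option Nat) :
    Option.map (fun n : Nat => (0 : Int) + (n : Int)) o = o.map Int.ofNat := by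
  cases o <;> simp

-- ===== VERDICT (by name: the statement is the Claim_ definition above) =====
theorem resolve_power_source_index_py_spec : Claim_equal_resolve_power_source_index_py := by
  intro requested sources _
  show resolve_power_source_index_py requested sources
      = resolve_power_source_index_py_alt requested sources
  simp only [resolve_power_source_index_py, resolve_power_source_index_py_alt]
  rw [fold_spec]
  have hmap : sources.map pvCanonA = sources.map pvCanonB := by
    simp [canon_eq]
  rw [canon_eq requested, hmap]
  set req := pvCanonB requested with hreq
  set cs := sources.map pvCanonB with hcs
  by_cases hm : cs.contains req
  · -- direct match present
    have : pvFirstIdx (fun x => pvCanonB x = req) sources 0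
        = (PySem.List.index? cs req).map Int.ofNat := by
      rw [firstIdx_eq_index? pvCanonB, ← hcs, index?_natCast_map]
    rw [if_pos hm, this]
    have hsome : (PySem.List.index? cs req).isSome := by
      rw [PySem.List.index?_isSome_iff]; exact List.contains_iff_mem.mp hm
    cases h : PySem.List.index? cs req with
    | none => rw [h] at hsome; simp at hsome
    | some n => simp [h]
  · -- no direct match
    have hnone : pvFirstIdx (fun x => pvCanonB x = req) sources 0 = none := by
      rw [firstIdx_eq_index? pvCanonB, ← hcs]
      have : PySem.List.index? cs req = none := by
        rw [PySem.List.index?_eq_none_iff]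
        intro hmem
        exact hm (List.contains_iff_mem.mpr hmem)
      rw [this]
      rfl
    rw [if_neg hm, hnone]
    by_cases hc : req = "CONTROL"
    · have hfb : (if req = "CONTROL" then some "HOST"
          else if req = "HOST" then some "CONTROL" else none) = some "HOST" := by
        simp [hc]
      rw [hfb]
      have hfi : pvFirstIdx (fun x => some (pvCanonB x) = some "HOST") sources 0
          = (PySem.List.index? cs "HOST").map Int.ofNat := by
        rw [firstIdx_congr _ (fun x => pvCanonB x = "HOST") (by simp),
          firstIdx_eq_index? pvCanonB, ← hcs, index?_natCast_map]
      by_cases hh : cs.contains "HOST"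
      · rw [if_pos ⟨hc, hh⟩, hfi]
      · have : PySem.List.index? cs "HOST" = none := by
          rw [PySem.List.index?_eq_none_iff]; exact fun hmem => hh (List.contains_iff_mem.mpr hmem)
        rw [if_neg (fun hand => hh hand.2), hfi, this]
        have hnh : ¬ (req = "HOST" ∧ cs.contains "CONTROL" = true) := by
          simp [hc]
        rw [if_neg hnh]
        simp
    · by_cases hho : req = "HOST"
      · have hfb : (if req = "CONTROL" then some "HOST"
            else if req = "HOST" then some "CONTROL" else none) = some "CONTROL" := by
          simp [hc, hho]
        rw [hfb]
        have hfi : pvFirstIdx (fun x => some (pvCanonB x) = some "CONTROL") sources 0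
            = (PySem.List.index? cs "CONTROL").map Int.ofNat := by
          rw [firstIdx_congr _ (fun x => pvCanonB x = "CONTROL") (by simp),
            firstIdx_eq_index? pvCanonB, ← hcs, index?_natCast_map]
        by_cases hcc : cs.contains "CONTROL"
        · rw [if_neg (fun hand => hc hand.1), if_pos ⟨hho, hcc⟩, hfi]
        · have : PySem.List.index? cs "CONTROL" = none := by
            rw [PySem.List.index?_eq_none_iff]; exact fun hmem => hcc (List.contains_iff_mem.mpr hmem)
          rw [if_neg (fun hand => hc hand.1), if_neg (fun hand => hcc hand.2), hfi, this]
          simp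
      · have hfb : (if req = "CONTROL" then some "HOST"
            else if req = "HOST" then some "CONTROL" else none) = none := by
          simp [hc, hho]
        rw [hfb, if_neg (fun hand => hc hand.1), if_neg (fun hand => hho hand.1)]
        rw [firstIdx_never (fun x => some (pvCanonB x) = none) (by simp) sources 0]
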